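-- pv_equiv track=rewrite | github.com/ELISA-IE/script | format_converter/tokenizer.py | unitok_tokenize
-- ===== SOURCE A (Python) =====
-- import unicodedata as ud
--
-- def unitok_tokenize(data):
--     toks = []
--     for offset, char in enumerate(data):
--         cc = ud.category(char)
--         # separate text by punctuation or symbol
--         if cc.startswith("P") or cc.startswith("S"):
--             toks.append(' ')
--             toks.append(char)
--             toks.append(' ')
--         else:
--             toks.append(char)
--
--     toks = [item for item in ''.join(toks).split() if item]
--
--     return ' '.join(toks)
-- ===== SOURCE B (Python) =====
-- import unicodedata as ud
--
-- def unitok_tokenize(data):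
--     # One pass: accumulate tokens directly with a current-word buffer
--     # instead of building a padded string and re-splitting it.
--     tokens = []
--     buf = []
--     for ch in data:
--         cc = ud.category(ch)
--         if cc.startswith("P") or cc.startswith("S"):
--             if buf:
--                 tokens.append(''.join(buf))
--                 buf = []
--             tokens.append(ch)
--         elif ch.isspace():
--             if buf:
--                 tokens.append(''.join(buf))
--                 buf = []
--         else:
--             buf.append(ch)
--     if buf:
--         tokens.append(''.join(buf))
--     return ' '.join(tokens)
-- ===== Notes on version B (the rewrite author's own statement) =====
-- stated objective: simpler
-- what changed: Replaces A's pad-with-spaces-then-join-split-rejoin pipeline by a single pass that accumulates tokens directly with a current-word buffer, flushing on punctuation/symbol or whitespace.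
import Mathlib
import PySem

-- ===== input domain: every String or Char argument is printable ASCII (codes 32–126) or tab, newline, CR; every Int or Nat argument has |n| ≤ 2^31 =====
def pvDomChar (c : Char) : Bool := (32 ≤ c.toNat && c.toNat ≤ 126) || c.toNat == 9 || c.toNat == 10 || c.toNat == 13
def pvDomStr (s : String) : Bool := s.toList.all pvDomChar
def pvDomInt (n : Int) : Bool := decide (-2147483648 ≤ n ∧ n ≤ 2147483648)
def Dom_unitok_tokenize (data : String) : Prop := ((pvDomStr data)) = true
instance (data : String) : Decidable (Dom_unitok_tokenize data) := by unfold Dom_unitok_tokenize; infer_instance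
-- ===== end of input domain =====

-- B replaces A's pad-then-split/join pipeline by a single pass accumulating tokens
-- with a current-word buffer (objective: simpler).

-- ud.category(c).startswith('P') or .startswith('S'): on the ASCII domain (codes 32..126
-- plus tab/newline/CR) this holds exactly for the printable non-alphanumeric non-space
-- characters; exact on Dom_unitok_tokenize.
def pvCatPS (c : Char) : Bool := (33 ≤ c.toNat && c.toNat ≤ 126) && !(PySem.Chars.isalnum c)

-- ===== PORT A =====
def unitok_tokenize (data : String) : String :=
  let toks : List (List Char) := data.toList.foldl
    (fun acc ch => if pvCatPS ch then acc ++ [[' '], [ch], [' ']] else acc ++ [[ch]]) []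
  let words := (PySem.Chars.split₀ (PySem.Chars.join [] toks)).filter (fun item => !item.isEmpty)
  String.ofList (PySem.Chars.join [' '] words)

-- ===== PORT B =====
def pvBStep (st : List (List Char) × List Char) (ch : Char) : List (List Char) × List Char :=
  if pvCatPS ch then
    ((if st.2.isEmpty then st.1 else st.1 ++ [st.2]) ++ [[ch]], [])
  else if PySem.Chars.isspace ch then
    ((if st.2.isEmpty then st.1 else st.1 ++ [st.2]), [])
  else (st.1, st.2 ++ [ch])

def unitok_tokenize_alt (data : String) : String :=
  let st := data.toList.foldl pvBStep ([], [])
  let tokens := if st.2.isEmpty then st.1 else st.1 ++ [st.2]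
  String.ofList (PySem.Chars.join [' '] tokens)

-- ===== PRECONDITION & SPEC =====
def Spec_unitok_tokenize (data : String) (out : String) : Prop := out = unitok_tokenize_alt data
instance (data : String) (out : String) : Decidable (Spec_unitok_tokenize data out) := by unfold Spec_unitok_tokenize; infer_instance

-- ===== CLAIM (what is proved, stated in full; the proofs are below) =====
def Claim_equal_unitok_tokenize : Prop := ∀ (data : String), Dom_unitok_tokenize data → Spec_unitok_tokenize data (unitok_tokenize data)

-- ===== LEMMAS AND PROOFS =====

-- the padded character stream A builds before splitting
def pvPad (cs : List Char) : List Char :=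
  cs.flatMap (fun ch => if pvCatPS ch then [' ', ch, ' '] else [ch])

-- the final flush of B's scan state
def pvFlush (st : List (List Char) × List Char) : List (List Char) :=
  if st.2.isEmpty then st.1 else st.1 ++ [st.2]

lemma pvCatPS_not_isspace (c : Char) (h : pvCatPS c = true) :
    PySem.Chars.isspace c = false := by
  simp [pvCatPS] at h
  simp [PySem.Chars.isspace]
  omega

lemma pvFold_flatten (cs : List Char) (acc : List (List Char)) :
    (cs.foldl (fun acc ch => if pvCatPS ch then acc ++ [[' '], [ch], [' ']] else acc ++ [[ch]]) acc).flatten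
      = acc.flatten ++ pvPad cs := by
  induction cs generalizing acc with
  | nil => simp [pvPad]
  | cons c cs ih =>
    by_cases h : pvCatPS c = true <;> simp [h, ih, pvPad, List.flatMap_cons]

lemma pvJoin_nil_flatten (parts : List (List Char)) :
    PySem.Chars.join [] parts = parts.flatten := by
  induction parts with
  | nil => rfl
  | cons p ps ih =>
    simp [PySem.Chars.join, List.intercalate] at ih ⊢
    cases ps <;> simp_all [List.intersperse]

lemma pvGo_eq_scan (cs : List Char) (cur : List Char) (acc : List (List Char)) :
    PySem.Chars.split₀.go (pvPad cs) cur acc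
      = pvFlush (cs.foldl pvBStep (acc.reverse, cur.reverse)) := by
  induction cs generalizing cur acc with
  | nil =>
    simp [pvPad, PySem.Chars.split₀.go, pvFlush]
  | cons c cs ih =>
    by_cases hps : pvCatPS c = true
    · have hsp := pvCatPS_not_isspace c hps
      have hspspace : PySem.Chars.isspace ' ' = true := by decide
      simp only [pvPad, List.flatMap_cons, hps, if_pos]
      show PySem.Chars.split₀.go (' ' :: c :: ' ' :: pvPad cs) cur acc = _
      rw [PySem.Chars.split₀.go]; simp only [hspspace, if_pos]
      by_cases hc : cur.isEmpty = true
      · rw [if_pos hc, PySem.Chars.split₀.go]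
        simp only [hsp, Bool.false_eq_true, if_false]
        rw [PySem.Chars.split₀.go]
        simp only [hspspace, if_pos, List.isEmpty_cons, Bool.false_eq_true, if_false]
        rw [ih]
        simp [pvBStep, hps, List.isEmpty_iff.mp hc]
      · rw [if_neg hc, PySem.Chars.split₀.go]
        simp only [hsp, Bool.false_eq_true, if_false]
        rw [PySem.Chars.split₀.go]
        simp only [hspspace, if_pos, List.isEmpty_cons, Bool.false_eq_true, if_false]
        rw [ih]
        have : cur.reverse.isEmpty = false := by
          simp [List.isEmpty_iff] at hc ⊢; exact hc
        simp [pvBStep, hps, this]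
    · simp only [pvPad, List.flatMap_cons, hps, Bool.false_eq_true, if_false]
      show PySem.Chars.split₀.go (c :: pvPad cs) cur acc = _
      rw [PySem.Chars.split₀.go]
      by_cases hsp : PySem.Chars.isspace c = true
      · simp only [hsp, if_pos]
        by_cases hc : cur.isEmpty = true
        · rw [if_pos hc, ih]
          simp [pvBStep, hps, hsp, List.isEmpty_iff.mp hc]
        · rw [if_neg hc, ih]
          have : cur.reverse.isEmpty = false := by
            simp [List.isEmpty_iff] at hc ⊢; exact hc
          simp [pvBStep, hps, hsp, this]
      · simp only [hsp, Bool.false_eq_true, if_false]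
        rw [ih]
        simp at hsp
        simp [pvBStep, hps, hsp]

lemma pvGo_nonempty (s cur : List Char) (acc : List (List Char))
    (h : ∀ t ∈ acc, t ≠ []) : ∀ t ∈ PySem.Chars.split₀.go s cur acc, t ≠ [] := by
  induction s generalizing cur acc with
  | nil =>
    intro t ht
    rw [PySem.Chars.split₀.go] at ht
    by_cases hc : cur.isEmpty = true
    · simp [hc] at ht; exact h t ht
    · simp [hc] at ht
      rcases ht with h1 | h1
      · exact h t h1
      · simp [h1]; simpa [List.isEmpty_iff] using hc
  | cons c s ih =>
    intro t ht
    rw [PySem.Chars.split₀.go] at ht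
    by_cases hsp : PySem.Chars.isspace c = true
    · simp only [hsp, if_pos] at ht
      by_cases hc : cur.isEmpty = true
      · rw [if_pos hc] at ht; exact ih [] acc h t ht
      · rw [if_neg hc] at ht
        refine ih [] (cur.reverse :: acc) ?_ t ht
        intro u hu
        simp only [List.mem_cons] at hu
        rcases hu with rfl | hu
        · simpa [List.isEmpty_iff] using hc
        · exact h u hu
    · simp only [hsp, Bool.false_eq_true, if_false] at ht
      exact ih (c :: cur) acc h t ht

lemma pvFlush_nonempty (cs : List Char) :
    ∀ t ∈ pvFlush (cs.foldl pvBStep ([], [])), t ≠ [] := by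
  have := pvGo_eq_scan cs [] []
  simp at this
  rw [← this]
  exact pvGo_nonempty _ _ _ (by simp)

-- ===== VERDICT (by name: the statement is the Claim_ definition above) =====
theorem unitok_tokenize_spec : Claim_equal_unitok_tokenize := by
  intro data _
  unfold Spec_unitok_tokenize unitok_tokenize unitok_tokenize_alt
  have h1 : PySem.Chars.join []
      (data.toList.foldl (fun acc ch => if pvCatPS ch then acc ++ [[' '], [ch], [' ']] else acc ++ [[ch]]) [])
        = pvPad data.toList := by
    rw [pvJoin_nil_flatten, pvFold_flatten]; simp
  simp only [h1]
  have h2 : PySem.Chars.split₀ (pvPad data.toList)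
      = pvFlush (data.toList.foldl pvBStep ([], [])) := by
    have := pvGo_eq_scan data.toList [] []
    simpa [PySem.Chars.split₀] using this
  rw [h2]
  have h3 : (pvFlush (data.toList.foldl pvBStep ([], []))).filter (fun item => !item.isEmpty)
      = pvFlush (data.toList.foldl pvBStep ([], [])) := by
    apply List.filter_eq_self.mpr
    intro t ht
    have := pvFlush_nonempty data.toList t ht
    simpa [List.isEmpty_iff] using this
  rw [h3]
  rfl
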